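-- pv_equiv track=rewrite | github.com/JoshuaShinkle/COS-120 | LABS/LAB07/Lab_07_12.py | centerOutTranspose
-- ===== SOURCE A (Python) =====
-- def centerOutTranspose(plaintext):
--     newString = ""
--     txt = plaintext
--     for x in plaintext:
--         index = len(txt) // 2
--         newString += txt[index]
--         txt = txt[:index] + txt[index+1:]
--     return newString
-- ===== SOURCE B (Python) =====
-- def centerOutTranspose(plaintext):
--     # O(n): keep the current string as two halves; the extracted char is always
--     # the first char of the right half, and at most one char moves between halves
--     # per step.  L holds the left half, R the right half stored reversed so both
--     # pops are from list ends (amortised O(1)).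
--     s = list(plaintext)
--     m = len(s)
--     L = s[:m // 2]
--     R = s[m // 2:][::-1]          # front of the right half is at the END of R
--     out = []
--     for k in range(m, 0, -1):     # k = current length before this extraction
--         out.append(R.pop())       # the middle char of the current string
--         if len(L) > (k - 1) // 2: # rebalance so len(L) == (new length) // 2
--             R.append(L.pop())
--     return "".join(out)
-- ===== Notes on version B (the rewrite author's own statement) =====
-- stated objective: faster
-- what changed: A rebuilds the whole string each step (slice + concatenate) to delete its middle character; B keeps the string as two halves (right half reversed), pops the extracted char from a list end and moves at most one char between halves per step, so each step is O(1) instead of O(n).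
import Mathlib
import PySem

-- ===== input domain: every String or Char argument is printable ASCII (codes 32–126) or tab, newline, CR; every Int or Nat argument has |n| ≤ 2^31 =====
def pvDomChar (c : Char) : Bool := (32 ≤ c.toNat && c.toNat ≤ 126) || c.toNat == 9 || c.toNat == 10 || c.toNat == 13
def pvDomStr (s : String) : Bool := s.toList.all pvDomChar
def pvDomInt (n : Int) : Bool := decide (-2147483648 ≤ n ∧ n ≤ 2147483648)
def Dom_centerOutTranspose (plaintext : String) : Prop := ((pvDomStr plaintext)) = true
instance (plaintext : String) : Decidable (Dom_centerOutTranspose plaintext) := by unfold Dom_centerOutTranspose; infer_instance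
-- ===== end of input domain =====

-- B replaces A's quadratic rebuild-the-string-each-step loop by an O(n) two-halves
-- scheme (the extracted char is always the first char of the right half); objective: faster.

-- ===== PORT A =====
-- one iteration of A's loop body; state = (newString as chars, txt as chars)
def aStep (st : List Char × List Char) : List Char × List Char :=
  let txt := st.2
  let index : Nat := txt.length / 2
  match PySem.List.pyGet? txt (index : Int) with
  | some c =>
      (st.1 ++ [c],
       PySem.List.slice txt none (some (index : Int)) ++
         PySem.List.slice txt (some ((index : Int) + 1)) none)
  | none => st  -- unreachable (txt is nonempty at every iteration; Python would raise IndexError)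

def centerOutTranspose (plaintext : String) : String :=
  let cs := plaintext.toList
  let st := cs.foldl (fun st _ => aStep st) ([], cs)
  String.ofList st.1

-- ===== PORT B =====
-- Source B's loop, fuel k = current length; Lean lists are kept with the pop-end at the
-- HEAD (Source B pops from the ends of its lists), out is accumulated reversed and
-- reversed once at the end (Source B appends and joins).
def bLoop : Nat → List Char → List Char → List Char → List Char
  | 0, _, _, out => out.reverse
  | Nat.succ k, L, R, out =>
    match R with
    | [] => out.reverse  -- unreachable (R has exactly k+1 ... chars left; Python's R.pop() never fails)
    | c :: R' =>
      if L.length > k / 2 then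
        match L with
        | [] => bLoop k [] R' (c :: out)  -- unreachable (the guard forces L nonempty)
        | d :: L' => bLoop k L' (d :: R') (c :: out)
      else
        bLoop k L R' (c :: out)

def centerOutTranspose_alt (plaintext : String) : String :=
  let cs := plaintext.toList
  let m := cs.length
  String.ofList (bLoop m (cs.take (m / 2)).reverse (cs.drop (m / 2)) [])

-- ===== PRECONDITION & SPEC =====
def Spec_centerOutTranspose (plaintext : String) (out : String) : Prop := out = centerOutTranspose_alt plaintext
instance (plaintext : String) (out : String) : Decidable (Spec_centerOutTranspose plaintext out) := by unfold Spec_centerOutTranspose; infer_instance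

-- ===== CLAIM (what is proved, stated in full; the proofs are below) =====
def Claim_equal_centerOutTranspose : Prop := ∀ (plaintext : String), Dom_centerOutTranspose plaintext → Spec_centerOutTranspose plaintext (centerOutTranspose plaintext)

-- ===== LEMMAS AND PROOFS =====

-- A's loop with explicit fuel (the loop variable of A's `for` is never used)
def aRec : Nat → List Char × List Char → List Char × List Char
  | 0, st => st
  | Nat.succ n, st => aRec n (aStep st)

lemma foldl_eq_aRec (l : List Char) : ∀ st, l.foldl (fun st _ => aStep st) st = aRec l.length st := by
  induction l with
  | nil => intro st; rfl
  | cons a l ih => intro st; simpa [List.foldl, aRec] using ih (aStep st)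

lemma aRec_acc (n : Nat) : ∀ acc txt, aRec n (acc, txt) =
    (acc ++ (aRec n (([] : List Char), txt)).1, (aRec n (([] : List Char), txt)).2) := by
  induction n with
  | zero => intro acc txt; simp [aRec]
  | succ n ih =>
    intro acc txt
    simp only [aRec, aStep]
    cases h : PySem.List.pyGet? txt ((txt.length / 2 : Nat) : Int) with
    | none => simpa [h] using ih acc txt
    | some c =>
      rw [ih (acc ++ [c]), ih ([] ++ [c])]
      simp

lemma bLoop_acc (k : Nat) : ∀ L R out, bLoop k L R out = out.reverse ++ bLoop k L R [] := by
  induction k with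
  | zero => intro L R out; simp [bLoop]
  | succ k ih =>
    intro L R out
    cases R with
    | nil => simp [bLoop]
    | cons c R' =>
      simp only [bLoop]
      split
      · cases L with
        | nil => rw [ih [] R' (c :: out), ih [] R' [c]]; simp
        | cons d L' =>
          show bLoop k L' (d :: R') (c :: out) = out.reverse ++ bLoop k L' (d :: R') [c]
          rw [ih L' (d :: R') (c :: out), ih L' (d :: R') [c]]; simp
      · rw [ih L R' (c :: out), ih L R' [c]]; simp

-- one step of A on the split state: extracts the head of the right part
lemma aStep_split (L R' : List Char) (c : Char) (h : L.length = (L.length + 1 + R'.length) / 2) :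
    aStep (([] : List Char), L.reverse ++ c :: R') = ([c], L.reverse ++ R') := by
  have hlen : (L.reverse ++ c :: R').length = L.length + 1 + R'.length := by
    simp; omega
  have hidx : (L.reverse ++ c :: R').length / 2 = L.reverse.length := by
    simp [hlen]; omega
  simp only [aStep, hidx]
  rw [PySem.List.pyGet?_append_length]
  have h1 : PySem.List.slice (L.reverse ++ c :: R') none (some ((L.reverse.length : Nat) : Int))
      = L.reverse := by
    rw [PySem.List.slice_to_natCast, List.take_left]
  have h2 : PySem.List.slice (L.reverse ++ c :: R') (some (((L.reverse.length : Nat) : Int) + 1)) none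
      = R' := by
    have : ((L.reverse.length : Nat) : Int) + 1 = (((L.reverse ++ [c]).length : Nat) : Int) := by
      simp
    rw [this, PySem.List.slice_from_natCast]
    have : L.reverse ++ c :: R' = (L.reverse ++ [c]) ++ R' := by simp
    rw [this, List.drop_left]
  rw [h1, h2]
  simp

lemma main (k : Nat) : ∀ L R : List Char, L.length = k / 2 → R.length = k - k / 2 →
    bLoop k L R [] = (aRec k (([] : List Char), L.reverse ++ R)).1 := by
  induction k with
  | zero =>
    intro L R hL hR
    have : R = [] := List.eq_nil_of_length_eq_zero (by omega)
    simp [bLoop, aRec, this]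
  | succ k ih =>
    intro L R hL hR
    have hRne : R ≠ [] := by
      intro h; subst h; simp at hR; omega
    obtain ⟨c, R', rfl⟩ : ∃ c R', R = c :: R' := by
      cases R with | nil => exact absurd rfl hRne | cons c R' => exact ⟨c, R', rfl⟩
    have hstep : aStep (([] : List Char), L.reverse ++ c :: R') = ([c], L.reverse ++ R') := by
      apply aStep_split
      simp at hR; omega
    have hR' : R'.length = k + 1 - (k + 1) / 2 - 1 := by simp at hR; omega
    simp only [bLoop]
    split
    · -- rebalance: L is nonempty, move its head to the right part
      rename_i hcond
      have hLne : L ≠ [] := by intro h; subst h; simp at hcond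
      obtain ⟨d, L', rfl⟩ : ∃ d L', L = d :: L' := by
        cases L with | nil => exact absurd rfl hLne | cons d L' => exact ⟨d, L', rfl⟩
      show bLoop k L' (d :: R') [c] = (aRec (k + 1) (([] : List Char), (d :: L').reverse ++ c :: R')).1
      rw [bLoop_acc k L' (d :: R') [c]]
      have hL' : L'.length = k / 2 := by
        simp only [List.length_cons] at hL hcond; omega
      have hdR' : (d :: R').length = k - k / 2 := by
        simp only [List.length_cons] at hL hcond ⊢; omega
      rw [ih L' (d :: R') hL' hdR']
      have htxt : L'.reverse ++ d :: R' = (d :: L').reverse ++ R' := by simp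
      rw [htxt]
      simp only [aRec, hstep]
      rw [aRec_acc k [c] ((d :: L').reverse ++ R')]
      simp
    · -- no rebalance
      rename_i hcond
      show bLoop k L R' [c] = (aRec (k + 1) (([] : List Char), L.reverse ++ c :: R')).1
      rw [bLoop_acc k L R' [c]]
      have hL2 : L.length = k / 2 := by omega
      have hR2 : R'.length = k - k / 2 := by omega
      rw [ih L R' hL2 hR2]
      simp only [aRec, hstep]
      rw [aRec_acc k [c] (L.reverse ++ R')]
      simp

-- ===== VERDICT (by name: the statement is the Claim_ definition above) =====
theorem centerOutTranspose_spec : Claim_equal_centerOutTranspose := by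
  intro plaintext _
  unfold Spec_centerOutTranspose centerOutTranspose centerOutTranspose_alt
  simp only [foldl_eq_aRec]
  rw [main (plaintext.toList.length) (plaintext.toList.take (plaintext.toList.length / 2)).reverse
      (plaintext.toList.drop (plaintext.toList.length / 2))
      (by simp; omega) (by simp)]
  simp
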